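-- pv_equiv track=rewrite | github.com/stalzkie/hiway | apps/backend/services/scraper.py | _is_likely_cert_domain
-- ===== SOURCE A (Python) =====
-- from typing import List, Dict, Any, Optional, Tuple, Set
--
-- CERT_ALLOWED_DOMAINS: List[str] = [
--     "grow.google",
--     "skillshop.withgoogle.com",
--     "skillshop.exceedlms.com",
--     "cloud.google.com",
--     "cloudskillsboost.google",
--     "developers.google.com",
--     "coursera.org",
--     "edx.org",
--     "udacity.com",
--     "deeplearning.ai",
--     "academy.hubspot.com",
--     "semrush.com",
--     "moz.com",
--     "academy.moz.com",
--     "yoast.com",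
--     "academy.intuit.com",
--     "quickbooks.intuit.com",
--     "xero.com",
--     "ibm.com",
--     "learn.microsoft.com",
--     "microsoft.com",
--     "aws.amazon.com",
--     "aws.training",
--     "tableau.com",
--     "tensorflow.org",
--     "pythoninstitute.org",
--     "oracle.com",
--     "cisco.com",
--     "cloudera.com",
--     "sas.com",
--     "datacamp.com",
--     "alison.com",
--     "salesforce.com",
--     "trailhead.salesforce.com",
--     "ads.google.com",
--     "support.google.com",
--     "academy.adobe.com",
--     "certification.adobe.com",
--     "credly.com",
--     "comptia.org",
--     "ec-council.org",
--     "isaca.org",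
--     "offensive-security.com",
--     "giac.org",
--     "redhat.com",
--     "vmware.com",
--     "fortinet.com",
--     "splunk.com",
--     "pmi.org",
--     "scrum.org",
--     "scrumalliance.org",
--     "cfainstitute.org",
--     "accaglobal.com",
--     "hbr.org",
--     "autodesk.com",
--     "unity.com",
--     "unrealengine.com",
--     "adobe.com",
--     "medscape.org",
--     "who.int",
--     "ama-assn.org",
--     "nursingworld.org",
--     "osha.gov",
--     "nccer.org",
--     "hvacexcellence.org",
--     "nsc.org",
--     "linkedin.com/learning",
--     "ahrefs.com/academy",
--     "mailchimp.com/resources/certification",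
--     "hootsuite.com/education",
--     "meta.com/blueprint",
--     "twitterflightschool.com",
--     "tiktokacademy.com",
--     "google.com/partners",
--     "upwork.com/academy",
--     "fiverr.com/learn",
--     "gohighlevel.com",
--     "canva.com/designschool/certifications",
--     "blender.org/certification",
--     "gcfglobal.org",
--     "ic3digitalliteracy.org",
--     "typing.com",
-- ]
--
-- def _is_likely_cert_domain(domain: str, title: str) -> bool:
--     """Flexible domain validation: allow official issuers and credential-y domains."""
--     d = (domain or "").lower()
--     t = (title or "").lower()
--     if any(d == allowed or d.endswith("." + allowed) for allowed in CERT_ALLOWED_DOMAINS):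
--         return True
--     # As a fallback: sites that look like academies + cert-like title
--     if any(ind in d for ind in ("academy", "certification", "train", "learn", "education", "skill", "campus")):
--         if any(w in t for w in ("certificate", "certification", "exam", "credential")):
--             return True
--     return False
-- ===== SOURCE B (Python) =====
-- from typing import List
--
-- CERT_ALLOWED_DOMAINS: List[str] = [
--     "grow.google",
--     "skillshop.withgoogle.com",
--     "skillshop.exceedlms.com",
--     "cloud.google.com",
--     "cloudskillsboost.google",
--     "developers.google.com",
--     "coursera.org",
--     "edx.org",
--     "udacity.com",
--     "deeplearning.ai",
--     "academy.hubspot.com",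
--     "semrush.com",
--     "moz.com",
--     "academy.moz.com",
--     "yoast.com",
--     "academy.intuit.com",
--     "quickbooks.intuit.com",
--     "xero.com",
--     "ibm.com",
--     "learn.microsoft.com",
--     "microsoft.com",
--     "aws.amazon.com",
--     "aws.training",
--     "tableau.com",
--     "tensorflow.org",
--     "pythoninstitute.org",
--     "oracle.com",
--     "cisco.com",
--     "cloudera.com",
--     "sas.com",
--     "datacamp.com",
--     "alison.com",
--     "salesforce.com",
--     "trailhead.salesforce.com",
--     "ads.google.com",
--     "support.google.com",
--     "academy.adobe.com",
--     "certification.adobe.com",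
--     "credly.com",
--     "comptia.org",
--     "ec-council.org",
--     "isaca.org",
--     "offensive-security.com",
--     "giac.org",
--     "redhat.com",
--     "vmware.com",
--     "fortinet.com",
--     "splunk.com",
--     "pmi.org",
--     "scrum.org",
--     "scrumalliance.org",
--     "cfainstitute.org",
--     "accaglobal.com",
--     "hbr.org",
--     "autodesk.com",
--     "unity.com",
--     "unrealengine.com",
--     "adobe.com",
--     "medscape.org",
--     "who.int",
--     "ama-assn.org",
--     "nursingworld.org",
--     "osha.gov",
--     "nccer.org",
--     "hvacexcellence.org",
--     "nsc.org",
--     "linkedin.com/learning",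
--     "ahrefs.com/academy",
--     "mailchimp.com/resources/certification",
--     "hootsuite.com/education",
--     "meta.com/blueprint",
--     "twitterflightschool.com",
--     "tiktokacademy.com",
--     "google.com/partners",
--     "upwork.com/academy",
--     "fiverr.com/learn",
--     "gohighlevel.com",
--     "canva.com/designschool/certifications",
--     "blender.org/certification",
--     "gcfglobal.org",
--     "ic3digitalliteracy.org",
--     "typing.com",
-- ]
--
-- CERT_ALLOWED_SET = set(CERT_ALLOWED_DOMAINS)
--
-- _INDICATORS = ("academy", "certification", "train", "learn", "education", "skill", "campus")
-- _TITLE_WORDS = ("certificate", "certification", "exam", "credential")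
--
--
-- def _contains_any(needles, s):
--     for n in needles:
--         if n in s:
--             return True
--     return False
--
--
-- def _suffix_allowed(d):
--     """d itself, or the part after any dot, is an allowed issuer (set lookup while walking d)."""
--     if d in CERT_ALLOWED_SET:
--         return True
--     for i, ch in enumerate(d):
--         if ch == '.' and d[i + 1:] in CERT_ALLOWED_SET:
--             return True
--     return False
--
--
-- def _is_likely_cert_domain(domain: str, title: str) -> bool:
--     d = (domain or "").lower()
--     t = (title or "").lower()
--     return _suffix_allowed(d) or (_contains_any(_INDICATORS, d) and _contains_any(_TITLE_WORDS, t))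
-- ===== Notes on version B (the rewrite author's own statement) =====
-- stated objective: alternative
-- what changed: A scans all 84 allowed domains testing equality or '.'-suffix against each inside an early-return if-chain; B walks the domain string once, doing a precomputed-set lookup on the whole string and on the substring after each dot, and combines the allowed-check with recursive indicator/title helpers in one boolean expression.
import Mathlib
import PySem

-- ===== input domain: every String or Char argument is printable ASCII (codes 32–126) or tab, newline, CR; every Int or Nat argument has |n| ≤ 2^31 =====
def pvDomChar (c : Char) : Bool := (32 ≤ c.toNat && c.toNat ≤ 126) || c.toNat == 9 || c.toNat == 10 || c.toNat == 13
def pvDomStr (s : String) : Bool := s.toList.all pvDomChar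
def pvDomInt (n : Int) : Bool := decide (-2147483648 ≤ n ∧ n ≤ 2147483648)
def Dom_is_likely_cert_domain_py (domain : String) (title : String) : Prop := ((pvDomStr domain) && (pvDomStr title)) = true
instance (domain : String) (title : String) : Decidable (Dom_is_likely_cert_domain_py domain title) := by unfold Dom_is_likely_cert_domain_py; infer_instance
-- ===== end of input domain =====

-- B replaces A's scan over all 84 allowed domains (equality or '.'-endswith each, in an early-return
-- if-chain) by one walk over the domain itself with set lookups at the whole string and after each dot,
-- combined with recursive contains-any helpers into a single boolean expression (alternative).

-- ===== PORT A =====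
def certAllowedDomains : List String := [
  "grow.google", "skillshop.withgoogle.com", "skillshop.exceedlms.com", "cloud.google.com",
  "cloudskillsboost.google", "developers.google.com", "coursera.org", "edx.org", "udacity.com",
  "deeplearning.ai", "academy.hubspot.com", "semrush.com", "moz.com", "academy.moz.com", "yoast.com",
  "academy.intuit.com", "quickbooks.intuit.com", "xero.com", "ibm.com", "learn.microsoft.com",
  "microsoft.com", "aws.amazon.com", "aws.training", "tableau.com", "tensorflow.org",
  "pythoninstitute.org", "oracle.com", "cisco.com", "cloudera.com", "sas.com", "datacamp.com",
  "alison.com", "salesforce.com", "trailhead.salesforce.com", "ads.google.com", "support.google.com",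
  "academy.adobe.com", "certification.adobe.com", "credly.com", "comptia.org", "ec-council.org",
  "isaca.org", "offensive-security.com", "giac.org", "redhat.com", "vmware.com", "fortinet.com",
  "splunk.com", "pmi.org", "scrum.org", "scrumalliance.org", "cfainstitute.org", "accaglobal.com",
  "hbr.org", "autodesk.com", "unity.com", "unrealengine.com", "adobe.com", "medscape.org", "who.int",
  "ama-assn.org", "nursingworld.org", "osha.gov", "nccer.org", "hvacexcellence.org", "nsc.org",
  "linkedin.com/learning", "ahrefs.com/academy", "mailchimp.com/resources/certification",
  "hootsuite.com/education", "meta.com/blueprint", "twitterflightschool.com", "tiktokacademy.com",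
  "google.com/partners", "upwork.com/academy", "fiverr.com/learn", "gohighlevel.com",
  "canva.com/designschool/certifications", "blender.org/certification", "gcfglobal.org",
  "ic3digitalliteracy.org", "typing.com"]

def is_likely_cert_domain_py (domain : String) (title : String) : Bool :=
  let d := PySem.Str.lower (if domain == "" then "" else domain)
  let t := PySem.Str.lower (if title == "" then "" else title)
  if certAllowedDomains.any (fun allowed => d == allowed || PySem.Str.endswith d ("." ++ allowed)) then
    true
  else if (["academy", "certification", "train", "learn", "education", "skill", "campus"].any
            (fun ind => PySem.Str.isIn ind d)) then
    if (["certificate", "certification", "exam", "credential"].any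
          (fun w => PySem.Str.isIn w t)) then
      true
    else false
  else false

-- ===== PORT B =====
-- Source B's CERT_ALLOWED_SET, on code-point lists
def certAllowedSet : PySem.Set (List Char) := PySem.Set.ofList (certAllowedDomains.map String.toList)

-- Source B's _contains_any: first-hit loop over the needles, as structural recursion
def containsAny : List String → String → Bool
  | [], _ => false
  | n :: ns, s => PySem.Str.isIn n s || containsAny ns s

-- the `for i, ch in enumerate(d): if ch == '.' and d[i+1:] in CERT_ALLOWED_SET` loop of _suffix_allowed
def scanDots : List Char → Bool
  | [] => false
  | c :: rest => (decide (c = '.') && PySem.Set.contains certAllowedSet rest) || scanDots rest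

-- Source B's _suffix_allowed
def suffixAllowed (d : List Char) : Bool :=
  PySem.Set.contains certAllowedSet d || scanDots d

def is_likely_cert_domain_py_alt (domain : String) (title : String) : Bool :=
  let d := PySem.Str.lower (if domain == "" then "" else domain)
  let t := PySem.Str.lower (if title == "" then "" else title)
  suffixAllowed d.toList ||
    (containsAny ["academy", "certification", "train", "learn", "education", "skill", "campus"] d &&
     containsAny ["certificate", "certification", "exam", "credential"] t)

-- ===== PRECONDITION & SPEC =====
def Spec_is_likely_cert_domain_py (domain : String) (title : String) (out : Bool) : Prop := out = is_likely_cert_domain_py_alt domain title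
instance (domain : String) (title : String) (out : Bool) : Decidable (Spec_is_likely_cert_domain_py domain title out) := by unfold Spec_is_likely_cert_domain_py; infer_instance

-- ===== CLAIM (what is proved, stated in full; the proofs are below) =====
def Claim_equal_is_likely_cert_domain_py : Prop := ∀ (domain : String) (title : String), Dom_is_likely_cert_domain_py domain title → Spec_is_likely_cert_domain_py domain title (is_likely_cert_domain_py domain title)

-- ===== LEMMAS AND PROOFS =====

lemma containsAny_eq (ns : List String) (s : String) :
    containsAny ns s = ns.any (fun n => PySem.Str.isIn n s) := by
  induction ns with
  | nil => rfl
  | cons n ns ih => simp [containsAny, ih]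

lemma scanDots_iff (l : List Char) :
    scanDots l = true ↔ ∃ p a, l = p ++ '.' :: a ∧ PySem.Set.contains certAllowedSet a = true := by
  induction l with
  | nil => simp [scanDots]
  | cons c rest ih =>
    simp only [scanDots, Bool.or_eq_true, Bool.and_eq_true, decide_eq_true_eq, ih]
    constructor
    · rintro (⟨hc, ha⟩ | ⟨p, a, hp, ha⟩)
      · exact ⟨[], rest, by simp [hc], ha⟩
      · exact ⟨c :: p, a, by simp [hp], ha⟩
    · rintro ⟨p, a, hp, ha⟩
      cases p with
      | nil =>
        simp only [List.nil_append, List.cons.injEq] at hp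
        exact Or.inl ⟨hp.1, hp.2 ▸ ha⟩
      | cons q qs =>
        simp only [List.cons_append, List.cons.injEq] at hp
        exact Or.inr ⟨qs, a, hp.2, ha⟩

lemma scan_eq_suffixAllowed (d : String) :
    (certAllowedDomains.any (fun allowed => d == allowed || PySem.Str.endswith d ("." ++ allowed)))
      = suffixAllowed d.toList := by
  apply Bool.eq_iff_iff.mpr
  simp only [suffixAllowed, Bool.or_eq_true, List.any_eq_true, beq_iff_eq,
    PySem.Str.endswith_eq, PySem.Chars.endswith_iff, PySem.Set.contains_iff,
    certAllowedSet, PySem.Set.mem_ofList, List.mem_map, scanDots_iff]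
  constructor
  · rintro ⟨al, hal, h | h⟩
    · exact Or.inl ⟨al, hal, by rw [h]⟩
    · right
      rcases h with ⟨p, hp⟩
      refine ⟨p, al.toList, ?_, ⟨al, hal, rfl⟩⟩
      have h : ("." ++ al).toList = '.' :: al.toList := by simp
      rw [h] at hp
      exact hp.symm
  · rintro (⟨al, hal, hd⟩ | ⟨p, a, hp, ha⟩)
    · exact ⟨al, hal, Or.inl (String.ext hd.symm ▸ rfl)⟩
    · rcases ha with ⟨al, hal, h⟩
      refine ⟨al, hal, Or.inr ⟨p, ?_⟩⟩
      simp [hp, h]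

-- ===== VERDICT (by name: the statement is the Claim_ definition above) =====
theorem is_likely_cert_domain_py_spec : Claim_equal_is_likely_cert_domain_py := by
  intro domain title _
  unfold Spec_is_likely_cert_domain_py is_likely_cert_domain_py is_likely_cert_domain_py_alt
  simp only [scan_eq_suffixAllowed, containsAny_eq]
  split_ifs with h1 h2 h3 <;> simp_all
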